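-- pv_equiv track=rewrite | github.com/jovisly/AdventOfCode | day_22/part1.py | fall_to
-- ===== SOURCE A (Python) =====
-- def fall_to(set_occupied, brick):
--     """Move the brick to the lowest possible location."""
--     curr_min_z = min((end[2] for end in brick))
--     blocked = False
--     has_moved = False
--
--     while blocked == False and curr_min_z > 1:
--         new_min_z = curr_min_z - 1
--         new_brick = []
--         for end in brick:
--             new_end = (end[0], end[1], end[2] - 1)
--             if new_end in set_occupied:
--                 blocked = True
--                 break
--
--             new_brick.append(new_end)
--
--         # If not blocked, then lower the brick.
--         if blocked == False:
--             brick = new_brick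
--             curr_min_z = new_min_z
--             has_moved = True
--
--     return has_moved, brick
-- ===== SOURCE B (Python) =====
-- def fall_to(set_occupied, brick):
--     """Move the brick to the lowest possible location (closed-form drop distance)."""
--     d = min(end[2] for end in brick) - 1
--     for (x, y, z) in brick:
--         for (ox, oy, oz) in set_occupied:
--             if ox == x and oy == y and oz < z:
--                 drop = z - oz - 1
--                 if drop < d:
--                     d = drop
--     if d <= 0:
--         return False, brick
--     return True, [(x, y, z - d) for (x, y, z) in brick]
-- ===== Notes on version B (the rewrite author's own statement) =====
-- stated objective: alternative
-- what changed: Replaces A's simulate-one-z-level-at-a-time while-loop (re-checking every brick cell against the occupied set at each level) by a single closed-form pass that computes the drop distance as the minimum over brick cells of the gap to the nearest occupied cell below in the same column (capped by the floor), then shifts the brick once.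
import Mathlib
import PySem

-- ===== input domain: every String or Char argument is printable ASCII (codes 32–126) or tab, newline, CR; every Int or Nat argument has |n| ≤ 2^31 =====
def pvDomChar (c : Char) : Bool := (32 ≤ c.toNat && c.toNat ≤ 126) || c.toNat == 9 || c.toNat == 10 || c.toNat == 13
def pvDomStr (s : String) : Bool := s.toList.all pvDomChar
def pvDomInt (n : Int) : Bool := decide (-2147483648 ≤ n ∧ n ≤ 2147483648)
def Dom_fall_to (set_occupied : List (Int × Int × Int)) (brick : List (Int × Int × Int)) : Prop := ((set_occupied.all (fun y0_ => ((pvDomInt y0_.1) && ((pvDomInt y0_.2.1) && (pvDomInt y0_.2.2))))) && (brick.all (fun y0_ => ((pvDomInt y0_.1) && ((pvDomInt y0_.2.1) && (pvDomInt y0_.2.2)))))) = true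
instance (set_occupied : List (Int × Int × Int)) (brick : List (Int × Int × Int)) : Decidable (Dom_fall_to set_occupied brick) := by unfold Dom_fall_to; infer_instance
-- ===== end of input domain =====

-- B replaces A's one-level-at-a-time dropping loop by a single closed-form drop
-- distance (minimum over per-cell gaps to the highest occupied cell below);
-- objective: alternative algorithm.

-- ===== PORT A =====
-- the inner `for end in brick` loop: none = blocked (break), some = the lowered brick
def fallToTry (set_occupied : List (Int × Int × Int)) : List (Int × Int × Int) → Option (List (Int × Int × Int))
  | [] => some []
  | e :: rest =>
    let ne : Int × Int × Int := (e.1, e.2.1, e.2.2 - 1)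
    if ne ∈ set_occupied then none
    else (fallToTry set_occupied rest).map (fun nb => ne :: nb)

-- the `while blocked == False and curr_min_z > 1` loop
def fallToLoop (set_occupied : List (Int × Int × Int)) (brick : List (Int × Int × Int)) (curr_min_z : Int) (has_moved : Bool) : Bool × (List (Int × Int × Int)) :=
  if h : 1 < curr_min_z then
    match fallToTry set_occupied brick with
    | none => (has_moved, brick)
    | some new_brick => fallToLoop set_occupied new_brick (curr_min_z - 1) true
  else (has_moved, brick)
termination_by (curr_min_z - 1).toNat
decreasing_by omega

def fall_to (set_occupied : List (Int × Int × Int)) (brick : List (Int × Int × Int)) : Bool × (List (Int × Int × Int)) :=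
  match PySem.List.min? (brick.map (fun e => e.2.2)) (fun z => z) with
  | none => (false, brick)   -- Python raises ValueError on an empty brick; excluded by Pre_
  | some curr_min_z => fallToLoop set_occupied brick curr_min_z false

-- ===== PORT B =====
def fall_to_alt (set_occupied : List (Int × Int × Int)) (brick : List (Int × Int × Int)) : Bool × (List (Int × Int × Int)) :=
  match PySem.List.min? (brick.map (fun e => e.2.2)) (fun z => z) with
  | none => (false, brick)   -- Python raises ValueError on an empty brick; excluded by Pre_
  | some m =>
    let d := brick.foldl (fun d c =>
      set_occupied.foldl (fun d o =>
        if o.1 = c.1 ∧ o.2.1 = c.2.1 ∧ o.2.2 < c.2.2 then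
          let drop := c.2.2 - o.2.2 - 1
          if drop < d then drop else d
        else d) d) (m - 1)
    if d ≤ 0 then (false, brick)
    else (true, brick.map (fun c => (c.1, c.2.1, c.2.2 - d)))

-- ===== PRECONDITION & SPEC =====
-- Pre_ excludes only the empty brick, on which A's `min` raises ValueError.
def Pre_fall_to (set_occupied : List (Int × Int × Int)) (brick : List (Int × Int × Int)) : Prop := brick ≠ []
instance (set_occupied : List (Int × Int × Int)) (brick : List (Int × Int × Int)) : Decidable (Pre_fall_to set_occupied brick) := by unfold Pre_fall_to; infer_instance
def pvWitness_fall_to : (List (Int × Int × Int)) × (List (Int × Int × Int)) := ([(0, 0, 1)], [(0, 0, 3), (0, 0, 4)])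

def Spec_fall_to (set_occupied : List (Int × Int × Int)) (brick : List (Int × Int × Int)) (out : Bool × (List (Int × Int × Int))) : Prop := out = fall_to_alt set_occupied brick
instance (set_occupied : List (Int × Int × Int)) (brick : List (Int × Int × Int)) (out : Bool × (List (Int × Int × Int))) : Decidable (Spec_fall_to set_occupied brick out) := by unfold Spec_fall_to; infer_instance

-- ===== CLAIM (what is proved, stated in full; the proofs are below) =====
def Claim_equal_fall_to : Prop := ∀ (set_occupied : List (Int × Int × Int)) (brick : List (Int × Int × Int)), Dom_fall_to set_occupied brick → Pre_fall_to set_occupied brick → Spec_fall_to set_occupied brick (fall_to set_occupied brick)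

-- ===== LEMMAS AND PROOFS =====

-- the candidate drops: for each brick cell, the gap to each occupied cell strictly below it in its column
def cands (occ brick : List (Int × Int × Int)) : List Int :=
  brick.flatMap (fun c =>
    (occ.filter (fun o => decide (o.1 = c.1 ∧ o.2.1 = c.2.1 ∧ o.2.2 < c.2.2))).map
      (fun o => c.2.2 - o.2.2 - 1))

def shift1 (c : Int × Int × Int) : Int × Int × Int := (c.1, c.2.1, c.2.2 - 1)

lemma inner_fold_eq (occ : List (Int × Int × Int)) (c : Int × Int × Int) (d : Int) :
    occ.foldl (fun d o =>
        if o.1 = c.1 ∧ o.2.1 = c.2.1 ∧ o.2.2 < c.2.2 then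
          let drop := c.2.2 - o.2.2 - 1
          if drop < d then drop else d
        else d) d
      = ((occ.filter (fun o => decide (o.1 = c.1 ∧ o.2.1 = c.2.1 ∧ o.2.2 < c.2.2))).map
          (fun o => c.2.2 - o.2.2 - 1)).foldl min d := by
  induction occ generalizing d with
  | nil => rfl
  | cons o rest ih =>
    by_cases h : o.1 = c.1 ∧ o.2.1 = c.2.1 ∧ o.2.2 < c.2.2
    · have h' : decide (o.1 = c.1 ∧ o.2.1 = c.2.1 ∧ o.2.2 < c.2.2) = true := by simpa using h
      rw [List.foldl_cons, List.filter_cons, if_pos h', List.map_cons, List.foldl_cons, ih]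
      congr 1
      rw [if_pos h, min_def]
      dsimp only
      split_ifs <;> omega
    · have h' : decide (o.1 = c.1 ∧ o.2.1 = c.2.1 ∧ o.2.2 < c.2.2) = false := by simpa using h
      rw [List.foldl_cons, List.filter_cons, ih]
      simp only [h', Bool.false_eq_true, if_false]
      congr 1
      rw [if_neg h]

lemma outer_fold_eq (occ : List (Int × Int × Int)) (brick : List (Int × Int × Int)) (init : Int) :
    brick.foldl (fun d c =>
      occ.foldl (fun d o =>
        if o.1 = c.1 ∧ o.2.1 = c.2.1 ∧ o.2.2 < c.2.2 then
          let drop := c.2.2 - o.2.2 - 1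
          if drop < d then drop else d
        else d) d) init
      = (cands occ brick).foldl min init := by
  induction brick generalizing init with
  | nil => rfl
  | cons c rest ih =>
    have hc : cands occ (c :: rest)
        = ((occ.filter (fun o => decide (o.1 = c.1 ∧ o.2.1 = c.2.1 ∧ o.2.2 < c.2.2))).map
            (fun o => c.2.2 - o.2.2 - 1)) ++ cands occ rest := by
      simp [cands]
    rw [List.foldl_cons, ih, hc, List.foldl_append, inner_fold_eq]

lemma le_foldl_min (l : List Int) (i k : Int) (hi : k ≤ i) (h : ∀ a ∈ l, k ≤ a) :
    k ≤ l.foldl min i := by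
  induction l generalizing i with
  | nil => exact hi
  | cons a rest ih =>
    exact ih (min i a) (le_min hi (h a (by simp))) (fun b hb => h b (by simp [hb]))

lemma foldl_min_map_sub (l : List Int) (i : Int) :
    (l.map (fun a => a - 1)).foldl min (i - 1) = l.foldl min i - 1 := by
  induction l generalizing i with
  | nil => rfl
  | cons a rest ih =>
    simp only [List.map_cons, List.foldl_cons, ← ih, min_sub_sub_right]

lemma fallToTry_none_iff (occ brick : List (Int × Int × Int)) :
    fallToTry occ brick = none ↔ ∃ c ∈ brick, shift1 c ∈ occ := by
  induction brick with
  | nil => simp [fallToTry]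
  | cons e rest ih =>
    simp only [fallToTry, shift1]
    by_cases h : ((e.1, e.2.1, e.2.2 - 1) : Int × Int × Int) ∈ occ
    · simp [h]
    · simp only [h, if_neg, if_false, Option.map_eq_none_iff, ih, shift1]
      simp [h]

lemma fallToTry_some (occ brick nb : List (Int × Int × Int))
    (h : fallToTry occ brick = some nb) :
    nb = brick.map shift1 ∧ ∀ c ∈ brick, shift1 c ∉ occ := by
  induction brick generalizing nb with
  | nil => simp [fallToTry] at h; simp [h]
  | cons e rest ih =>
    simp only [fallToTry] at h
    by_cases hm : ((e.1, e.2.1, e.2.2 - 1) : Int × Int × Int) ∈ occ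
    · simp [hm] at h
    · rw [if_neg hm, Option.map_eq_some_iff] at h
      obtain ⟨nb', hnb', heq⟩ := h
      obtain ⟨h1, h2⟩ := ih nb' hnb'
      rw [← heq]
      constructor
      · simp [h1, shift1]
      · intro c hc
        rcases List.mem_cons.mp hc with rfl | hc
        · simpa [shift1] using hm
        · exact h2 c hc

lemma cands_blocked (occ brick : List (Int × Int × Int)) (c : Int × Int × Int)
    (hc : c ∈ brick) (ho : shift1 c ∈ occ) : (0 : Int) ∈ cands occ brick := by
  simp only [cands, List.mem_flatMap]
  refine ⟨c, hc, ?_⟩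
  simp only [List.mem_map, List.mem_filter]
  exact ⟨shift1 c, ⟨ho, by simp [shift1]⟩, by simp [shift1]⟩

lemma cands_ge_one (occ brick : List (Int × Int × Int))
    (h : ∀ c ∈ brick, shift1 c ∉ occ) : ∀ a ∈ cands occ brick, (1 : Int) ≤ a := by
  intro a ha
  simp only [cands, List.mem_flatMap, List.mem_map, List.mem_filter] at ha
  obtain ⟨c, hc, o, ⟨ho, hcond⟩, rfl⟩ := ha
  simp only [decide_eq_true_eq] at hcond
  obtain ⟨h1, h2, h3⟩ := hcond
  have hne : o ≠ shift1 c := fun he => h c hc (he ▸ ho)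
  have : o.2.2 ≠ c.2.2 - 1 := by
    intro hz
    exact hne (by simp only [shift1]; exact Prod.ext h1 (Prod.ext h2 hz))
  omega

lemma cell_shift (occ : List (Int × Int × Int)) (c : Int × Int × Int)
    (hc : shift1 c ∉ occ) :
    (occ.filter (fun o => decide (o.1 = (shift1 c).1 ∧ o.2.1 = (shift1 c).2.1 ∧ o.2.2 < (shift1 c).2.2))).map
        (fun o => (shift1 c).2.2 - o.2.2 - 1)
      = ((occ.filter (fun o => decide (o.1 = c.1 ∧ o.2.1 = c.2.1 ∧ o.2.2 < c.2.2))).map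
          (fun o => c.2.2 - o.2.2 - 1)).map (fun a => a - 1) := by
  rw [List.map_map]
  have hf : (occ.filter (fun o => decide (o.1 = (shift1 c).1 ∧ o.2.1 = (shift1 c).2.1 ∧ o.2.2 < (shift1 c).2.2)))
      = occ.filter (fun o => decide (o.1 = c.1 ∧ o.2.1 = c.2.1 ∧ o.2.2 < c.2.2)) := by
    apply List.filter_congr
    intro o ho
    have hne : o ≠ shift1 c := fun he => hc (he ▸ ho)
    simp only [shift1, decide_eq_decide]
    constructor
    · rintro ⟨h1, h2, h3⟩; exact ⟨h1, h2, by omega⟩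
    · rintro ⟨h1, h2, h3⟩
      refine ⟨h1, h2, ?_⟩
      have : o.2.2 ≠ c.2.2 - 1 := by
        intro hz
        exact hne (by simp only [shift1]; exact Prod.ext h1 (Prod.ext h2 hz))
      omega
  rw [hf]
  apply List.map_congr_left
  intro o _
  simp only [shift1, Function.comp]
  ring

lemma cands_shift (occ brick : List (Int × Int × Int))
    (h : ∀ c ∈ brick, shift1 c ∉ occ) :
    cands occ (brick.map shift1) = (cands occ brick).map (fun a => a - 1) := by
  induction brick with
  | nil => rfl
  | cons c rest ih =>
    have h1 := h c (List.mem_cons_self)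
    have h2 := ih (fun c hc => h c (List.mem_cons_of_mem _ hc))
    simp only [cands, List.map_cons, List.flatMap_cons] at h2 ⊢
    rw [List.map_append, ← h2, cell_shift occ c h1]

-- main loop characterization
lemma loop_eq (occ : List (Int × Int × Int)) :
    ∀ (n : Nat) (brick : List (Int × Int × Int)) (m : Int) (hm : Bool),
      (m - 1).toNat = n →
      fallToLoop occ brick m hm =
        (if (cands occ brick).foldl min (m - 1) ≤ 0 then (hm, brick)
         else (true, brick.map (fun c => (c.1, c.2.1, c.2.2 - (cands occ brick).foldl min (m - 1))))) := by
  intro n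
  induction n with
  | zero =>
    intro brick m hm hn
    have hm1 : ¬ 1 < m := by omega
    rw [fallToLoop, dif_neg hm1]
    have : (cands occ brick).foldl min (m - 1) ≤ 0 :=
      le_trans ((PySem.List.foldl_min_le (cands occ brick) (m - 1)).1) (by omega)
    rw [if_pos this]
  | succ n ih =>
    intro brick m hm hn
    have hm1 : 1 < m := by omega
    rw [fallToLoop, dif_pos hm1]
    cases htry : fallToTry occ brick with
    | none =>
      obtain ⟨c, hc, ho⟩ := (fallToTry_none_iff occ brick).1 htry
      have h0 : (cands occ brick).foldl min (m - 1) ≤ 0 :=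
        (PySem.List.foldl_min_le (cands occ brick) (m - 1)).2 0 (cands_blocked occ brick c hc ho)
      simp [h0]
    | some nb =>
      dsimp only
      obtain ⟨rfl, hnot⟩ := fallToTry_some occ brick nb htry
      have hd1 : (1 : Int) ≤ (cands occ brick).foldl min (m - 1) :=
        le_foldl_min _ _ _ (by omega) (cands_ge_one occ brick hnot)
      rw [ih (brick.map shift1) (m - 1) true (by omega)]
      rw [cands_shift occ brick hnot, foldl_min_map_sub]
      set d := (cands occ brick).foldl min (m - 1) with hd
      by_cases hle : d - 1 ≤ 0
      · have : d = 1 := by omega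
        rw [if_pos hle, if_neg (by omega)]
        simp [this, shift1]
      · rw [if_neg hle, if_neg (by omega)]
        simp only [List.map_map]
        congr 1
        congr 1
        funext c
        simp [shift1, Function.comp]

-- ===== VERDICT (by name: the statement is the Claim_ definition above) =====
theorem fall_to_spec : Claim_equal_fall_to := by
  intro occ brick _ hpre
  unfold Spec_fall_to fall_to fall_to_alt
  cases hmin : PySem.List.min? (brick.map (fun e => e.2.2)) (fun z => z) with
  | none =>
    exact absurd (by simpa [List.map_eq_nil_iff] using (PySem.List.min?_eq_none_iff _ _).1 hmin) hpre
  | some m =>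
    dsimp only
    rw [loop_eq occ (m - 1).toNat brick m false rfl, outer_fold_eq]
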